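-- pv_equiv track=rewrite | github.com/vegacastilloe/River-Vowel-Sorter | river-vowel-sorter.py | is_ordered
-- ===== SOURCE A (Python) =====
-- def is_ordered(vowels):
--     if len(set(vowels)) < 2:
--         return False
--     directions = []
--     for i in range(len(vowels) - 1):
--         if vowels[i] < vowels[i + 1]:
--             directions.append('up')
--         elif vowels[i] > vowels[i + 1]:
--             directions.append('down')
--     return len(set(directions)) == 1
-- ===== SOURCE B (Python) =====
-- def is_ordered(vowels):
--     if len(set(vowels)) < 2:
--         return False
--     seq = list(vowels)
--     return seq == sorted(seq) or seq == sorted(seq, reverse=True)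
-- ===== Notes on version B (the rewrite author's own statement) =====
-- stated objective: simpler
-- what changed: Replaces the per-adjacent-pair direction-token scan and direction-set cardinality test with a direct sort-then-compare: the sequence equals sorted(seq) or sorted(seq, reverse=True), keeping the distinctness guard.
import Mathlib
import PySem

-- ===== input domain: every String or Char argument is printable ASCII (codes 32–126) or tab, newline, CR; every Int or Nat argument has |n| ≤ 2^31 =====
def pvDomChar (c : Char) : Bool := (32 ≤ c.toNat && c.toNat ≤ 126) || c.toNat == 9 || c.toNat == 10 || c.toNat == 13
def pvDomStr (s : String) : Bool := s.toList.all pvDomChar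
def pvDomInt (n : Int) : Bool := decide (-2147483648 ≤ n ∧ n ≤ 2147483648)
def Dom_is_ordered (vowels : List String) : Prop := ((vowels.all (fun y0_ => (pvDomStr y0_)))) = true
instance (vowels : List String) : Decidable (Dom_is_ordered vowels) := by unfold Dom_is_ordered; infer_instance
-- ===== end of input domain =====

-- B replaces A's direction-token scan and direction-set cardinality test with a sort-then-compare
-- (seq == sorted(seq) or seq == sorted(seq, reverse=True)) under the same distinctness guard; objective: simpler.


-- ===== PORT A =====
def is_ordered (vowels : List String) : Bool :=
  if PySem.Set.len (PySem.Set.ofList vowels) < 2 then false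
  else
    let directions : List String :=
      (PySem.List.pyRange 0 (PySem.List.len vowels - 1) 1).foldl
        (fun directions i =>
          if PySem.List.pyGetD vowels i "" < PySem.List.pyGetD vowels (i + 1) "" then
            directions ++ ["up"]
          else if PySem.List.pyGetD vowels (i + 1) "" < PySem.List.pyGetD vowels i "" then
            directions ++ ["down"]
          else directions) []
    PySem.Set.len (PySem.Set.ofList directions) == 1

-- ===== PORT B =====
def is_ordered_alt (vowels : List String) : Bool :=
  if PySem.Set.len (PySem.Set.ofList vowels) < 2 then false
  else
    let seq := vowels
    (seq == PySem.List.sorted seq (fun x => x)) || (seq == PySem.List.sorted seq (fun x => x) true)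

-- ===== PRECONDITION & SPEC =====
def Spec_is_ordered (vowels : List String) (out : Bool) : Prop := out = is_ordered_alt vowels
instance (vowels : List String) (out : Bool) : Decidable (Spec_is_ordered vowels out) := by unfold Spec_is_ordered; infer_instance

-- ===== CLAIM (what is proved, stated in full; the proofs are below) =====
def Claim_equal_is_ordered : Prop := ∀ (vowels : List String), Dom_is_ordered vowels → Spec_is_ordered vowels (is_ordered vowels)

-- ===== LEMMAS AND PROOFS =====

-- the direction tokens A's loop appends at index i
def dirTok (v : List String) (i : Int) : List String :=
  if PySem.List.pyGetD v i "" < PySem.List.pyGetD v (i + 1) "" then ["up"]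
  else if PySem.List.pyGetD v (i + 1) "" < PySem.List.pyGetD v i "" then ["down"]
  else []

theorem directions_eq (v : List String) :
    (PySem.List.pyRange 0 (PySem.List.len v - 1) 1).foldl
      (fun directions i =>
        if PySem.List.pyGetD v i "" < PySem.List.pyGetD v (i + 1) "" then directions ++ ["up"]
        else if PySem.List.pyGetD v (i + 1) "" < PySem.List.pyGetD v i "" then directions ++ ["down"]
        else directions) []
    = (PySem.List.pyRange 0 (PySem.List.len v - 1) 1).flatMap (dirTok v) := by
  have h : (fun (directions : List String) (i : Int) =>
      if PySem.List.pyGetD v i "" < PySem.List.pyGetD v (i + 1) "" then directions ++ ["up"]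
      else if PySem.List.pyGetD v (i + 1) "" < PySem.List.pyGetD v i "" then directions ++ ["down"]
      else directions)
      = fun directions i => directions ++ dirTok v i := by
    funext acc i; unfold dirTok; split_ifs <;> simp
  rw [h, PySem.List.foldl_append_eq_flatMap]
  simp

theorem dirTok_at (v : List String) (k : Nat) (hk : k + 1 < v.length) :
    dirTok v (k : Int)
      = if v[k] < v[k+1] then ["up"] else if v[k+1] < v[k] then ["down"] else [] := by
  unfold dirTok
  have e1 : PySem.List.pyGetD v (k : Int) "" = v[k] := by
    rw [PySem.List.pyGetD_eq_getElem v "" (by omega) (by exact_mod_cast by omega)]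
    simp
  have e2 : PySem.List.pyGetD v ((k : Int) + 1) "" = v[k+1] := by
    have : ((k : Int) + 1) = ((k + 1 : Nat) : Int) := by push_cast; ring
    rw [this, PySem.List.pyGetD_eq_getElem v "" (by omega) (by exact_mod_cast hk)]
    simp
  rw [e1, e2]

theorem down_not_mem_iff (v : List String) :
    "down" ∉ (PySem.List.pyRange 0 (PySem.List.len v - 1) 1).flatMap (dirTok v)
      ↔ List.Pairwise (· ≤ ·) v := by
  rw [← List.isChain_iff_pairwise, List.isChain_iff_getElem]
  simp only [List.mem_flatMap, not_exists, not_and, PySem.List.mem_pyRange_one, PySem.List.len_eq]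
  constructor
  · intro h k hk
    by_contra hnot
    have hlt : v[k+1] < v[k] := lt_of_not_ge hnot
    have := h (k : Int) ⟨by omega, by omega⟩
    rw [dirTok_at v k hk] at this
    have h1 : ¬ v[k] < v[k+1] := not_lt_of_gt hlt
    rw [if_neg h1, if_pos hlt] at this
    simp at this
  · intro h i hi
    have h0 : 0 ≤ i := hi.1
    have hkk : i.toNat + 1 < v.length := by omega
    have : i = (i.toNat : Int) := by omega
    rw [this, dirTok_at v i.toNat hkk]
    have hle := h i.toNat hkk
    split_ifs with h1 h2
    · simp
    · exact absurd hle (not_le_of_gt h2)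
    · simp

theorem up_not_mem_iff (v : List String) :
    "up" ∉ (PySem.List.pyRange 0 (PySem.List.len v - 1) 1).flatMap (dirTok v)
      ↔ List.Pairwise (fun a b => b ≤ a) v := by
  rw [← List.isChain_iff_pairwise, List.isChain_iff_getElem]
  simp only [List.mem_flatMap, not_exists, not_and, PySem.List.mem_pyRange_one, PySem.List.len_eq]
  constructor
  · intro h k hk
    by_contra hnot
    have hlt : v[k] < v[k+1] := lt_of_not_ge hnot
    have := h (k : Int) ⟨by omega, by omega⟩
    rw [dirTok_at v k hk] at this
    rw [if_pos hlt] at this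
    simp at this
  · intro h i hi
    have h0 : 0 ≤ i := hi.1
    have hkk : i.toNat + 1 < v.length := by omega
    have : i = (i.toNat : Int) := by omega
    rw [this, dirTok_at v i.toNat hkk]
    have hle := h i.toNat hkk
    split_ifs with h1 h2
    · exact absurd hle (not_le_of_gt h1)
    · simp
    · simp

theorem dir_elems (v : List String) :
    ∀ x ∈ (PySem.List.pyRange 0 (PySem.List.len v - 1) 1).flatMap (dirTok v),
      x = "up" ∨ x = "down" := by
  intro x hx
  rw [List.mem_flatMap] at hx
  obtain ⟨i, _, hxi⟩ := hx
  unfold dirTok at hxi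
  split_ifs at hxi <;> simp at hxi <;> simp [hxi]

theorem nodup_two_univ (s : List String) (hs : s.Nodup) (h : ∀ x ∈ s, x = "up" ∨ x = "down") :
    s.length = 1 ↔ (("up" ∈ s ∧ "down" ∉ s) ∨ ("down" ∈ s ∧ "up" ∉ s)) := by
  match s with
  | [] => simp
  | [x] => rcases h x (by simp) with h | h <;> subst h <;> simp
  | x :: y :: t =>
    constructor
    · intro hl; simp at hl
    · intro hr
      exfalso
      have hx := h x (by simp)
      have hy := h y (by simp)
      have hxy : x ≠ y := by
        intro he
        rw [List.nodup_cons] at hs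
        exact hs.1 (by simp [he])
      rcases hx with rfl | rfl <;> rcases hy with rfl | rfl <;> simp_all

theorem length_le_one_of_all_eq (l : List String) (a : String)
    (h : ∀ x ∈ l, x = a) (hn : l.Nodup) : l.length ≤ 1 := by
  match l with
  | [] => simp
  | [x] => simp
  | x :: y :: t =>
    exfalso
    have hx := h x (by simp)
    have hy := h y (by simp)
    subst hx
    rw [List.nodup_cons] at hn
    exact hn.1 (by simp [hy])

theorem const_of_both (v : List String)
    (h1 : List.Pairwise (· ≤ ·) v) (h2 : List.Pairwise (fun a b : String => b ≤ a) v) :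
    (PySem.Set.ofList v).length ≤ 1 := by
  match v with
  | [] => simp [PySem.Set.ofList]
  | a :: t =>
    apply length_le_one_of_all_eq _ a
    · intro x hx
      rw [PySem.Set.mem_ofList] at hx
      rcases List.mem_cons.mp hx with hx | hx
      · exact hx
      · exact (le_antisymm (List.rel_of_pairwise_cons h2 hx) (List.rel_of_pairwise_cons h1 hx))
    · exact PySem.Set.nodup_ofList _
  

theorem alt_fwd_iff (v : List String) :
    (v == PySem.List.sorted v (fun x => x)) = true ↔ List.Pairwise (· ≤ ·) v := by
  rw [beq_iff_eq]
  constructor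
  · intro h
    have := PySem.List.sorted_pairwise v (fun x => x)
    rw [← h] at this
    exact this
  · intro h
    exact (PySem.List.sorted_eq_self_of_pairwise v _ h).symm

theorem alt_rev_iff (v : List String) :
    (v == PySem.List.sorted v (fun x => x) true) = true ↔ List.Pairwise (fun a b : String => b ≤ a) v := by
  rw [beq_iff_eq]
  constructor
  · intro h
    have := PySem.List.sorted_pairwise_rev v (fun x => x)
    rw [← h] at this
    exact this
  · intro h
    exact (PySem.List.sorted_rev_eq_self_of_pairwise v _ h).symm

-- ===== VERDICT (by name: the statement is the Claim_ definition above) =====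
theorem is_ordered_spec : Claim_equal_is_ordered := by
  intro v _
  unfold Spec_is_ordered is_ordered is_ordered_alt
  by_cases hg : PySem.Set.len (PySem.Set.ofList v) < 2
  · rw [if_pos hg, if_pos hg]
  · simp only [if_neg hg]
    rw [directions_eq]
    set D := (PySem.List.pyRange 0 (PySem.List.len v - 1) 1).flatMap (dirTok v) with hD
    rw [Bool.eq_iff_iff]
    have hlen : ¬ ((PySem.Set.ofList v).length : Int) < 2 := by
      simpa [PySem.Set.len] using hg
    have hboth : ¬ (List.Pairwise (· ≤ ·) v ∧ List.Pairwise (fun a b : String => b ≤ a) v) := by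
      rintro ⟨h1, h2⟩
      have := const_of_both v h1 h2
      omega
    have hset : PySem.Set.len (PySem.Set.ofList D) = ((PySem.Set.ofList D).length : Int) := by
      simp [PySem.Set.len]
    constructor
    · intro h
      rw [beq_iff_eq, hset] at h
      have hone : (PySem.Set.ofList D).length = 1 := by exact_mod_cast h
      rw [nodup_two_univ _ (PySem.Set.nodup_ofList _)
        (fun x hx => dir_elems v x ((PySem.Set.mem_ofList _ _).mp hx))] at hone
      simp only [PySem.Set.mem_ofList] at hone
      rw [Bool.or_eq_true]
      rcases hone with ⟨_, hnd⟩ | ⟨_, hnu⟩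
      · exact Or.inl ((alt_fwd_iff v).mpr ((down_not_mem_iff v).mp hnd))
      · exact Or.inr ((alt_rev_iff v).mpr ((up_not_mem_iff v).mp hnu))
    · intro h
      rw [Bool.or_eq_true] at h
      rw [beq_iff_eq, hset]
      have hone : (PySem.Set.ofList D).length = 1 := by
        rw [nodup_two_univ _ (PySem.Set.nodup_ofList _)
          (fun x hx => dir_elems v x ((PySem.Set.mem_ofList _ _).mp hx))]
        simp only [PySem.Set.mem_ofList]
        rcases h with h | h
        · have hle := (alt_fwd_iff v).mp h
          have hnd : "down" ∉ D := (down_not_mem_iff v).mpr hle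
          have hup : "up" ∈ D := by
            by_contra hnu
            exact hboth ⟨hle, (up_not_mem_iff v).mp hnu⟩
          exact Or.inl ⟨hup, hnd⟩
        · have hge := (alt_rev_iff v).mp h
          have hnu : "up" ∉ D := (up_not_mem_iff v).mpr hge
          have hdn : "down" ∈ D := by
            by_contra hnd
            exact hboth ⟨(down_not_mem_iff v).mp hnd, hge⟩
          exact Or.inr ⟨hdn, hnu⟩
      exact_mod_cast hone
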